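-- pv_equiv track=rewrite | github.com/EchoStone1101/verge | tools/generate_vstd_md.py | _net_braces
-- ===== SOURCE A (Python) =====
-- def _net_braces(s: str) -> int:
--     """Count net { minus } in a string, ignoring string literal contents.
--
--     We deliberately do NOT track char literals: Rust lifetime annotations ('a,
--     'static, '_) look like the start of a char literal to a naive scanner, and
--     would cause the closing { of any generic impl/fn with lifetimes to be
--     swallowed.  Real char literals that contain { or } ('{'  / '}') are
--     vanishingly rare in Verus signatures and spec bodies, so the small risk of
--     miscounting them is far outweighed by the correctness gain on lifetimes.
--     """
--     n, in_s = 0, False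
--     i = 0
--     while i < len(s):
--         c = s[i]
--         if c == '\\' and in_s:
--             i += 2  # skip escaped character inside string literal
--             continue
--         if c == '"':
--             in_s = not in_s
--         elif not in_s:
--             if c == '{':
--                 n += 1
--             elif c == '}':
--                 n -= 1
--         i += 1
--     return n
-- ===== SOURCE B (Python) =====
-- def _strip_literals(s: str) -> str:
--     """Return s with every string literal (and its quotes) removed."""
--     out = []
--     i = 0
--     while i < len(s):
--         c = s[i]
--         if c != '"':
--             out.append(c)
--             i += 1
--             continue
--         # skip over the literal body, honouring backslash escapes
--         i += 1
--         while i < len(s) and s[i] != '"':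
--             i += 2 if s[i] == '\\' else 1
--         i += 1  # step past the closing quote (or past the end)
--     return ''.join(out)
--
--
-- def _net_braces(s: str) -> int:
--     code = _strip_literals(s)
--     return code.count('{') - code.count('}')
-- ===== Notes on version B (the rewrite author's own statement) =====
-- stated objective: faster
-- what changed: A's single index scan with an in-string flag and a running brace counter is replaced by a two-phase decomposition: first strip every string literal out of the text, then take the difference of two C-level str.count calls on the residue.
import Mathlib
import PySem

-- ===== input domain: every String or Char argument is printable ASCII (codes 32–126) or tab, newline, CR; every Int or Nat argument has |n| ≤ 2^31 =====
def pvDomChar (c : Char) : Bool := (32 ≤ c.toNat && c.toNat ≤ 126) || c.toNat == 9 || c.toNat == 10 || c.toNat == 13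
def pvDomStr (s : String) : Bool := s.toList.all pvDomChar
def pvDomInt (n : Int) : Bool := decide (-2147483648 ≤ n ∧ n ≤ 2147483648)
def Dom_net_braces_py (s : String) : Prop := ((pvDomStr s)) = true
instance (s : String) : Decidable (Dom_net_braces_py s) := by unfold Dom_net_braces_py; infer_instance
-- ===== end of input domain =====

-- B strips the string literals out first and then counts braces with two library
-- counts (simpler two-phase decomposition, no in-string flag); same value as A on all inputs.

-- ===== PORT A =====
-- A's while-loop over index i, state (n, in_s); i += 2 on an escape inside a literal
-- becomes dropping one element of the remaining suffix.
def netALoop (cs : List Char) (in_s : Bool) (n : Int) : Int :=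
  match cs with
  | [] => n
  | c :: rest =>
    if c = '\\' ∧ in_s = true then netALoop (rest.drop 1) in_s n
    else if c = '"' then netALoop rest (!in_s) n
    else if in_s = false then
      if c = '{' then netALoop rest in_s (n + 1)
      else if c = '}' then netALoop rest in_s (n - 1)
      else netALoop rest in_s n
    else netALoop rest in_s n
termination_by cs.length
decreasing_by all_goals (simp only [List.length_drop, List.length_cons]; omega)

def net_braces_py (s : String) : Int := netALoop s.toList false 0

-- ===== PORT B =====
-- Source B's inner skip loop: suffix after the literal body and its closing quote.
def skipLitB (cs : List Char) : List Char :=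
  match cs with
  | [] => []
  | c :: rest =>
    if c = '"' then rest
    else if c = '\\' then skipLitB (rest.drop 1)
    else skipLitB rest
termination_by cs.length
decreasing_by all_goals (simp only [List.length_drop, List.length_cons]; omega)

-- termination helper for stripLits (cited by its decreasing_by)
theorem skipLitB_length_le (cs : List Char) : (skipLitB cs).length ≤ cs.length := by
  induction cs using skipLitB.induct <;> simp_all [skipLitB] <;> omega

-- Source B's outer loop: copy out-of-literal characters, skipping each literal.
def stripLits (cs : List Char) : List Char :=
  match cs with
  | [] => []
  | c :: rest =>
    if c = '"' then stripLits (skipLitB rest)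
    else c :: stripLits rest
termination_by cs.length
decreasing_by
  · have := skipLitB_length_le rest; simp; omega
  · simp

def net_braces_py_alt (s : String) : Int :=
  let code := stripLits s.toList
  (PySem.Chars.count code "{".toList : Int) - (PySem.Chars.count code "}".toList : Int)

-- ===== PRECONDITION & SPEC =====
def Spec_net_braces_py (s : String) (out : Int) : Prop := out = net_braces_py_alt s
instance (s : String) (out : Int) : Decidable (Spec_net_braces_py s out) := by unfold Spec_net_braces_py; infer_instance

-- ===== CLAIM (what is proved, stated in full; the proofs are below) =====
def Claim_equal_net_braces_py : Prop := ∀ (s : String), Dom_net_braces_py s → Spec_net_braces_py s (net_braces_py s)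

-- ===== LEMMAS AND PROOFS =====

-- Python str.count with a single-character needle is List.count.
theorem count_go_single (c : Char) : ∀ (fuel : Nat) (cs : List Char) (acc : Nat),
    cs.length ≤ fuel → PySem.Chars.count.go [c] fuel cs acc = acc + cs.count c := by
  intro fuel
  induction fuel with
  | zero =>
    intro cs acc h
    have hcs : cs = [] := List.eq_nil_of_length_eq_zero (by omega)
    subst hcs
    simp [PySem.Chars.count.go]
  | succ f ih =>
    intro cs acc h
    match cs with
    | [] => simp [PySem.Chars.count.go]
    | d :: t =>
      simp only [PySem.Chars.count.go]
      by_cases hd : d = c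
      · subst hd
        have : List.isPrefixOf [d] (d :: t) = true := by simp [List.isPrefixOf]
        rw [if_pos this]
        simp only [List.length_singleton, List.drop_succ_cons, List.drop_zero]
        rw [ih t (acc + 1) (by simp at h; omega)]
        simp; omega
      · have : List.isPrefixOf [c] (d :: t) = false := by
          simp [List.isPrefixOf]; exact fun hh => (hd hh.symm).elim
        rw [if_neg (by simp [this])]
        rw [ih t acc (by simp at h; omega)]
        simp [hd]

theorem count_single (cs : List Char) (c : Char) :
    PySem.Chars.count cs [c] = cs.count c := by
  simp only [PySem.Chars.count, List.isEmpty_cons, Bool.false_eq_true, if_false]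
  simpa using count_go_single c cs.length cs 0 le_rfl

-- The net count as B computes it, on the list side.
def deltaB (cs : List Char) : Int :=
  ((stripLits cs).count '{' : Int) - ((stripLits cs).count '}' : Int)

-- Main invariant: A's scanner outside a literal computes n + deltaB, and inside a
-- literal it resumes (outside) at the suffix B's skipLitB produces.
theorem netALoop_eq (k : Nat) : ∀ (cs : List Char), cs.length ≤ k → ∀ (n : Int),
    netALoop cs true n = netALoop (skipLitB cs) false n ∧
    netALoop cs false n = n + deltaB cs := by
  induction k with
  | zero =>
    intro cs h n
    have : cs = [] := List.eq_nil_of_length_eq_zero (by omega)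
    subst this
    simp [netALoop, skipLitB, deltaB, stripLits]
  | succ k ih =>
    intro cs h n
    match cs with
    | [] => simp [netALoop, skipLitB, deltaB, stripLits]
    | c :: rest =>
      simp only [List.length_cons] at h
      constructor
      · -- in_s = true
        by_cases hb : c = '\\'
        · subst hb
          rw [show netALoop ('\\' :: rest) true n = netALoop (rest.drop 1) true n from by
                simp [netALoop]]
          rw [show skipLitB ('\\' :: rest) = skipLitB (rest.drop 1) from by
                simp [skipLitB]]
          exact (ih (rest.drop 1) (by simp; omega) n).1
        · by_cases hq : c = '"'
          · subst hq
            simp [netALoop, skipLitB]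
          · rw [show netALoop (c :: rest) true n = netALoop rest true n from by
                  simp [netALoop, hb, hq]]
            rw [show skipLitB (c :: rest) = skipLitB rest from by simp [skipLitB, hb, hq]]
            exact (ih rest (by omega) n).1
      · -- in_s = false
        by_cases hq : c = '"'
        · subst hq
          rw [show netALoop ('"' :: rest) false n = netALoop rest true n from by
                simp [netALoop]]
          rw [(ih rest (by omega) n).1]
          rw [(ih (skipLitB rest) (le_trans (skipLitB_length_le rest) (by omega)) n).2]
          simp [deltaB, stripLits]
        · have hstrip : stripLits (c :: rest) = c :: stripLits rest := by
            simp [stripLits, hq]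
          by_cases ho : c = '{'
          · subst ho
            rw [show netALoop ('{' :: rest) false n = netALoop rest false (n + 1) from by
                  simp [netALoop]]
            rw [(ih rest (by omega) (n + 1)).2]
            simp [deltaB, hstrip]
            ring
          · by_cases hc : c = '}'
            · subst hc
              rw [show netALoop ('}' :: rest) false n = netALoop rest false (n - 1) from by
                    simp [netALoop]]
              rw [(ih rest (by omega) (n - 1)).2]
              simp [deltaB, hstrip]
              ring
            · rw [show netALoop (c :: rest) false n = netALoop rest false n from by
                    simp [netALoop, hq, ho, hc]]
              rw [(ih rest (by omega) n).2]
              simp [deltaB, hstrip, ho, hc]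

-- ===== VERDICT (by name: the statement is the Claim_ definition above) =====
theorem net_braces_py_spec : Claim_equal_net_braces_py := by
  intro s _
  unfold Spec_net_braces_py net_braces_py net_braces_py_alt
  rw [(netALoop_eq s.toList.length s.toList le_rfl 0).2]
  simp [deltaB, count_single]
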